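-- pv_equiv track=rewrite | github.com/weipanux/seo-geo-blog-writer | scripts/internal_linking.py | _find_keyword_matches
-- ===== SOURCE A (Python) =====
-- from typing import Dict, List, Optional, Tuple
--
-- def _find_keyword_matches(
--
--     content: str,
--     keywords: List[str]
-- ) -> Dict[str, List[str]]:
--     """
--     Find keyword mentions in content with context.
--
--     Returns:
--         Dict of keyword -> list of context snippets
--     """
--     matches = {}
--
--     content_lower = content.lower()
--
--     for keyword in keywords:
--         keyword_lower = keyword.lower()
--
--         # Find all occurrences
--         positions = []
--         start = 0
--         while True:
--             pos = content_lower.find(keyword_lower, start)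
--             if pos == -1:
--                 break
--             positions.append(pos)
--             start = pos + len(keyword_lower)
--
--         if positions:
--             # Extract context around each match
--             contexts = []
--             for pos in positions:
--                 # Get 100 chars before and after
--                 context_start = max(0, pos - 100)
--                 context_end = min(len(content), pos + len(keyword) + 100)
--                 context = content[context_start:context_end].strip()
--                 contexts.append(context)
--
--             matches[keyword] = contexts
--
--     return matches
-- ===== SOURCE B (Python) =====
-- def _find_keyword_matches(content, keywords):
--     """Find keyword mentions in content with context (candidate-list + greedy selection)."""
--     matches = {}
--     content_lower = content.lower()
--     n = len(content)
--     for keyword in keywords: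
--         keyword_lower = keyword.lower()
--         m = len(keyword_lower)
--         # all candidate match positions at once
--         hits = [i for i in range(n - m + 1) if content_lower.startswith(keyword_lower, i)]
--         # greedy left-to-right selection of non-overlapping hits, context extracted on the fly
--         contexts = []
--         last_end = 0
--         for i in hits:
--             if i >= last_end:
--                 contexts.append(content[max(0, i - 100):min(n, i + m + 100)].strip())
--                 last_end = i + m
--         if contexts:
--             matches[keyword] = contexts
--     return matches
-- ===== Notes on version B (the rewrite author's own statement) =====
-- stated objective: alternative
-- what changed: A repeatedly calls find() and skips past each hit, then extracts contexts in a second pass; B instead enumerates all candidate match positions per keyword in one comprehension and then greedily selects non-overlapping ones in a single fold that extracts each context on the fly.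
-- outside the precondition, e.g. on _find_keyword_matches('ab', ['']): A does not finish within the time limit, B returns {'': ['ab', 'ab', 'ab']}
import Mathlib
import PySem

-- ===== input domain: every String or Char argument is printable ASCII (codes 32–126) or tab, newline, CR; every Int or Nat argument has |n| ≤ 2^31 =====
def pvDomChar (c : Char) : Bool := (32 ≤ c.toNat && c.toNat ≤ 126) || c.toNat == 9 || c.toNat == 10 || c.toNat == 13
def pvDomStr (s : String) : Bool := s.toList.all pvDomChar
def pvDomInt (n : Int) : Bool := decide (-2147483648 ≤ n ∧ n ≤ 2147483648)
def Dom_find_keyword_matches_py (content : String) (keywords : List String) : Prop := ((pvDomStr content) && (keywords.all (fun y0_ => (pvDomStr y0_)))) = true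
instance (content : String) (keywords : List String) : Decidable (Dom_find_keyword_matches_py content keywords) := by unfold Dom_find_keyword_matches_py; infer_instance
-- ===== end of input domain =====

-- B replaces A's repeated find-and-skip loop plus separate context pass by one candidate-position
-- comprehension followed by a greedy non-overlap selection fold (objective: alternative, not faster).

-- ===== PORT A =====
-- the context snippet content[max(0,pos-100):min(len(content),pos+klen+100)].strip()
-- (identical expression in Source A and Source B, so shared by both ports)
def pvContext (cs : List Char) (pos : Int) (klen : Int) : String :=
  String.ofList (PySem.Chars.strip (PySem.List.slice cs
    (some (max 0 (pos - 100))) (some (min (cs.length : Int) (pos + klen + 100)))))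

-- A's 'while True: pos = content_lower.find(keyword_lower, start) …' loop; the fuel argument only
-- makes the loop total in Lean (on a non-empty keyword, cl.length + 2 iterations are never exhausted —
-- proved below; on an empty keyword the Python loop never terminates, excluded by Pre_)
def pvAFind (cl kl : List Char) : Nat → Int → List Int
  | 0, _ => []
  | fuel + 1, start =>
    let pos := PySem.Chars.findFrom cl kl start
    if pos = -1 then []
    else pos :: pvAFind cl kl fuel (pos + (kl.length : Int))

def find_keyword_matches_py (content : String) (keywords : List String) : List (String × List String) :=
  let cs := content.toList
  let content_lower := PySem.Chars.lower cs
  (keywords.foldl (fun (acc : PySem.Dict String (List String)) keyword =>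
      let keyword_lower := PySem.Chars.lower keyword.toList
      let positions := pvAFind content_lower keyword_lower (content_lower.length + 2) 0
      if positions ≠ [] then
        acc.insert keyword
          (positions.map (fun pos => pvContext cs pos (keyword.toList.length : Int)))
      else acc)
    PySem.Dict.empty).items

-- ===== PORT B =====
def find_keyword_matches_py_alt (content : String) (keywords : List String) : List (String × List String) :=
  let cs := content.toList
  let n := cs.length
  let content_lower := PySem.Chars.lower cs
  (keywords.foldl (fun (acc : PySem.Dict String (List String)) keyword =>
      let kl := PySem.Chars.lower keyword.toList
      let m := kl.length
      -- hits = [i for i in range(n - m + 1) if content_lower.startswith(kl, i)]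
      -- (content_lower.startswith(kl, i) with 0 ≤ i is: kl is a prefix of content_lower[i:])
      let hits := (PySem.List.pyRange 0 ((n : Int) - (m : Int) + 1) 1).filter
        (fun i => PySem.Chars.startswith (content_lower.drop i.toNat) kl)
      -- greedy selection: contexts/last_end accumulator pair
      let res := hits.foldl (fun (st : List String × Int) i =>
          if st.2 ≤ i then (st.1 ++ [pvContext cs i (m : Int)], i + (m : Int)) else st)
        ([], 0)
      if res.1 ≠ [] then acc.insert keyword res.1 else acc)
    PySem.Dict.empty).items

-- ===== PRECONDITION & SPEC =====
-- Pre_ excludes an empty keyword string: there A's find loop finds '' at position start and advances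
-- start by 0, so the Python A never returns (infinite loop); B returns a match at every position.
def Pre_find_keyword_matches_py (content : String) (keywords : List String) : Prop :=
  "" ∉ keywords
instance (content : String) (keywords : List String) : Decidable (Pre_find_keyword_matches_py content keywords) := by unfold Pre_find_keyword_matches_py; infer_instance

def pvWitness_find_keyword_matches_py : String × List String :=
  ("Alpha beta, alpha!", ["alpha", "beta", "gamma"])

def Spec_find_keyword_matches_py (content : String) (keywords : List String) (out : List (String × List String)) : Prop := out = find_keyword_matches_py_alt content keywords
instance (content : String) (keywords : List String) (out : List (String × List String)) : Decidable (Spec_find_keyword_matches_py content keywords out) := by unfold Spec_find_keyword_matches_py; infer_instance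

-- ===== CLAIM (what is proved, stated in full; the proofs are below) =====
def Claim_equal_find_keyword_matches_py : Prop := ∀ (content : String) (keywords : List String), Dom_find_keyword_matches_py content keywords → Pre_find_keyword_matches_py content keywords → Spec_find_keyword_matches_py content keywords (find_keyword_matches_py content keywords)

-- ===== LEMMAS AND PROOFS =====

-- the greedy non-overlap selector B's fold implements
def pvSel (m : Int) : List Int → Int → List Int
  | [], _ => []
  | h :: t, last => if last ≤ h then h :: pvSel m t (h + m) else pvSel m t last

theorem pvLower_length (s : List Char) : (PySem.Chars.lower s).length = s.length := by
  simp [PySem.Chars.lower]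

-- B's fold = append of the selected positions' contexts
theorem pvFoldl_sel (f : Int → String) (m : Int) :
    ∀ (l : List Int) (acc : List String) (last : Int),
      (l.foldl (fun (st : List String × Int) i =>
        if st.2 ≤ i then (st.1 ++ [f i], i + m) else st) (acc, last)).1
      = acc ++ (pvSel m l last).map f := by
  intro l
  induction l with
  | nil => intro acc last; simp [pvSel]
  | cons h t ih =>
    intro acc last
    by_cases hle : last ≤ h
    · simp [pvSel, hle, List.foldl_cons, ih]
    · simp [pvSel, hle, List.foldl_cons, ih]

-- pvSel ignores elements below the current last_end
theorem pvSel_filter (m : Int) (hm : 0 ≤ m) :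
    ∀ (N : Nat) (l : List Int), l.length ≤ N → ∀ (last : Int),
      pvSel m (l.filter (fun x => decide (last ≤ x))) last = pvSel m l last := by
  intro N
  induction N with
  | zero =>
    intro l hl last
    have : l = [] := List.eq_nil_of_length_eq_zero (Nat.le_zero.mp hl)
    subst this; simp
  | succ N ih =>
    intro l hl last
    match l with
    | [] => simp
    | h :: t =>
      have ht : t.length ≤ N := by simpa using Nat.succ_le_succ_iff.mp (by simpa using hl)
      by_cases hle : last ≤ h
      · have hcons : (h :: t).filter (fun x => decide (last ≤ x))
            = h :: t.filter (fun x => decide (last ≤ x)) := by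
          simp [hle]
        rw [hcons]
        show (if last ≤ h then
                h :: pvSel m (t.filter (fun x => decide (last ≤ x))) (h + m)
              else pvSel m (t.filter (fun x => decide (last ≤ x))) last)
          = if last ≤ h then h :: pvSel m t (h + m) else pvSel m t last
        rw [if_pos hle, if_pos hle]
        congr 1
        have hF : (t.filter (fun x => decide (last ≤ x))).length ≤ N :=
          le_trans (List.length_filter_le _ _) ht
        have h2 : (t.filter (fun x => decide ((h + m) ≤ x))).filter (fun x => decide (last ≤ x))
            = t.filter (fun x => decide ((h + m) ≤ x)) := by
          apply List.filter_eq_self.mpr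
          intro x hx
          have hx' : (h + m) ≤ x := by
            have := List.of_mem_filter hx
            simpa using this
          have : last ≤ x := le_trans (le_trans hle (by omega)) hx'
          simpa using this
        calc pvSel m (t.filter (fun x => decide (last ≤ x))) (h + m)
            = pvSel m ((t.filter (fun x => decide (last ≤ x))).filter
                (fun x => decide ((h + m) ≤ x))) (h + m) := (ih _ hF _).symm
          _ = pvSel m ((t.filter (fun x => decide ((h + m) ≤ x))).filter
                (fun x => decide (last ≤ x))) (h + m) := by rw [List.filter_comm]
          _ = pvSel m (t.filter (fun x => decide ((h + m) ≤ x))) (h + m) := by rw [h2]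
          _ = pvSel m t (h + m) := ih t ht (h + m)
      · have hcons : (h :: t).filter (fun x => decide (last ≤ x))
            = t.filter (fun x => decide (last ≤ x)) := by
          simp [hle]
        rw [hcons, ih t ht last]
        show pvSel m t last = (if last ≤ h then h :: pvSel m t (h + m) else pvSel m t last)
        rw [if_neg hle]

-- main loop lemma: A's find-and-skip loop equals the greedy selector over any sorted list T that
-- holds exactly the candidate positions ≥ start
theorem pvAFind_eq_sel (cl kl : List Char) (hkl : kl ≠ []) :
    ∀ (fuel : Nat) (T : List Int) (start : Int),
      T.length < fuel → 0 ≤ start → start ≤ (cl.length : Int) →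
      (∀ i : Int, i ∈ T ↔ (start ≤ i ∧ 0 ≤ i ∧ i.toNat + kl.length ≤ cl.length ∧
          kl <+: cl.drop i.toNat)) →
      T.Pairwise (· < ·) →
      pvAFind cl kl fuel start = pvSel (kl.length : Int) T start := by
  intro fuel
  induction fuel with
  | zero => intro T start hlen; omega
  | succ fuel ih =>
    intro T start hlen h0 hn hmem hpw
    have hm1 : 1 ≤ kl.length := List.length_pos_of_ne_nil hkl
    have hkle : start.toNat ≤ cl.length := by omega
    have hstart : ((start.toNat : Nat) : Int) = start := Int.toNat_of_nonneg h0
    simp only [pvAFind]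
    by_cases hpos : PySem.Chars.findFrom cl kl start = -1
    · -- no occurrence at or after start: T must be empty
      have hno : ¬ kl <:+: cl.drop start.toNat := by
        have hiff := PySem.Chars.findFrom_natCast_eq_neg_one_iff cl kl start.toNat hkle
        rw [hstart] at hiff
        exact hiff.mp hpos
      have hT : T = [] := by
        apply List.eq_nil_iff_forall_not_mem.mpr
        intro i hi
        obtain ⟨hsi, hi0, hib, hip⟩ := (hmem i).mp hi
        apply hno
        apply (PySem.Chars.isIn_iff_infix _ _).mp
        apply (PySem.Chars.exists_prefix_drop_iff_isIn _ _).mp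
        refine ⟨i.toNat - start.toNat, ?_⟩
        rw [List.drop_drop]
        have heq : start.toNat + (i.toNat - start.toNat) = i.toNat := by omega
        rw [heq]
        exact hip
      rw [hT, if_pos hpos]
      rfl
    · have hspec := PySem.Chars.findFrom_natCast_spec cl kl start.toNat hkle
        (by rw [hstart]; exact hpos)
      rw [hstart] at hspec
      obtain ⟨hsp, hpref, hmin⟩ := hspec
      set pos := PySem.Chars.findFrom cl kl start with hposdef
      have hpos0 : 0 ≤ pos := le_trans h0 hsp
      have hlenb : pos.toNat + kl.length ≤ cl.length := by
        have h1 := hpref.length_le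
        rw [List.length_drop] at h1
        omega
      have hmemT : pos ∈ T := (hmem pos).mpr ⟨hsp, hpos0, hlenb, hpref⟩
      cases T with
      | nil => simp at hmemT
      | cons h t =>
        have hh : h = pos := by
          obtain ⟨hsh, hh0, hhb, hhp⟩ := (hmem h).mp List.mem_cons_self
          by_contra hne
          rcases lt_or_gt_of_ne hne with hlt | hgt
          · exact hmin h.toNat (by omega) (by omega) hhp
          · have hpt : pos ∈ t := by
              rcases List.mem_cons.mp hmemT with he | ht2
              · exact absurd he.symm hne
              · exact ht2
            have := (List.pairwise_cons.mp hpw).1 pos hpt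
            omega
        subst hh
        rw [if_neg hpos]
        show pos :: pvAFind cl kl fuel (pos + (kl.length : Int))
            = pvSel (kl.length : Int) (pos :: t) start
        have hsel : pvSel (kl.length : Int) (pos :: t) start
            = pos :: pvSel (kl.length : Int) t (pos + (kl.length : Int)) := by
          show (if start ≤ pos then pos :: pvSel (kl.length : Int) t (pos + (kl.length : Int))
                else pvSel (kl.length : Int) t start)
              = pos :: pvSel (kl.length : Int) t (pos + (kl.length : Int))
          rw [if_pos hsp]
        rw [hsel]
        congr 1
        have hfil := pvSel_filter (kl.length : Int) (by positivity) t.length t le_rfl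
          (pos + (kl.length : Int))
        rw [← hfil]
        apply ih
        · have := List.length_filter_le (fun x => decide (pos + (kl.length : Int) ≤ x)) t
          simp only [List.length_cons] at hlen
          omega
        · omega
        · omega
        · intro i
          constructor
          · intro hi
            have hi' := List.mem_filter.mp hi
            obtain ⟨hit, hige⟩ := hi'
            have hige' : pos + (kl.length : Int) ≤ i := by simpa using hige
            obtain ⟨_, hi0, hib, hip⟩ := (hmem i).mp (List.mem_cons_of_mem pos hit)
            exact ⟨hige', hi0, hib, hip⟩
          · rintro ⟨hige, hi0, hib, hip⟩
            have hiT : i ∈ pos :: t := (hmem i).mpr ⟨by omega, hi0, hib, hip⟩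
            have hit : i ∈ t := by
              rcases List.mem_cons.mp hiT with he | ht2
              · omega
              · exact ht2
            exact List.mem_filter.mpr ⟨hit, by simpa using hige⟩
        · exact ((List.pairwise_cons.mp hpw).2).filter _

-- per-keyword step equality (kw ≠ "")
theorem pvStep_eq (cs : List Char) (kw : String) (hkne : kw ≠ "")
    (acc : PySem.Dict String (List String)) :
    (if pvAFind (PySem.Chars.lower cs) (PySem.Chars.lower kw.toList)
          ((PySem.Chars.lower cs).length + 2) 0 ≠ [] then
        acc.insert kw
          ((pvAFind (PySem.Chars.lower cs) (PySem.Chars.lower kw.toList)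
              ((PySem.Chars.lower cs).length + 2) 0).map
            (fun pos => pvContext cs pos (kw.toList.length : Int)))
      else acc)
    = (if (((PySem.List.pyRange 0 ((cs.length : Int) - ((PySem.Chars.lower kw.toList).length : Int) + 1) 1).filter
            (fun i => PySem.Chars.startswith ((PySem.Chars.lower cs).drop i.toNat)
              (PySem.Chars.lower kw.toList))).foldl
          (fun (st : List String × Int) i =>
            if st.2 ≤ i then
              (st.1 ++ [pvContext cs i (((PySem.Chars.lower kw.toList).length : Nat) : Int)],
                i + ((PySem.Chars.lower kw.toList).length : Int))
            else st) ([], 0)).1 ≠ [] then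
        acc.insert kw
          (((PySem.List.pyRange 0 ((cs.length : Int) - ((PySem.Chars.lower kw.toList).length : Int) + 1) 1).filter
              (fun i => PySem.Chars.startswith ((PySem.Chars.lower cs).drop i.toNat)
                (PySem.Chars.lower kw.toList))).foldl
            (fun (st : List String × Int) i =>
              if st.2 ≤ i then
                (st.1 ++ [pvContext cs i (((PySem.Chars.lower kw.toList).length : Nat) : Int)],
                  i + ((PySem.Chars.lower kw.toList).length : Int))
              else st) ([], 0)).1
      else acc) := by
  have hcl : (PySem.Chars.lower cs).length = cs.length := pvLower_length cs
  have hkwlen : (PySem.Chars.lower kw.toList).length = kw.toList.length := pvLower_length _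
  have hklw : PySem.Chars.lower kw.toList ≠ [] := by
    intro h
    apply hkne
    apply String.toList_eq_nil_iff.mp
    have := congrArg List.length h
    rw [hkwlen] at this
    exact List.eq_nil_of_length_eq_zero this
  set cl := PySem.Chars.lower cs with hcldef
  set klw := PySem.Chars.lower kw.toList with hklwdef
  set hits := (PySem.List.pyRange 0 ((cs.length : Int) - ((klw.length : Nat) : Int) + 1) 1).filter
      (fun i => PySem.Chars.startswith (cl.drop i.toNat) klw) with hhitsdef
  have hposeq : pvAFind cl klw (cl.length + 2) 0 = pvSel ((klw.length : Nat) : Int) hits 0 := by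
    apply pvAFind_eq_sel cl klw hklw
    · have h1 := List.length_filter_le
        (fun i => PySem.Chars.startswith (cl.drop i.toNat) klw)
        (PySem.List.pyRange 0 ((cs.length : Int) - ((klw.length : Nat) : Int) + 1) 1)
      have h2 := PySem.List.length_pyRange_one 0 ((cs.length : Int) - ((klw.length : Nat) : Int) + 1)
      rw [hhitsdef]
      omega
    · exact le_rfl
    · exact Int.natCast_nonneg _
    · intro i
      constructor
      · intro hi
        obtain ⟨hr, hsw⟩ := List.mem_filter.mp hi
        obtain ⟨h0i, hlt⟩ := PySem.List.mem_pyRange_one.mp hr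
        have hp : klw <+: cl.drop i.toNat := (PySem.Chars.startswith_iff _ _).mp hsw
        exact ⟨h0i, h0i, by omega, hp⟩
      · rintro ⟨h0i, _, hib, hip⟩
        refine List.mem_filter.mpr ⟨PySem.List.mem_pyRange_one.mpr ⟨h0i, by omega⟩, ?_⟩
        exact (PySem.Chars.startswith_iff _ _).mpr hip
    · exact (PySem.List.pairwise_lt_pyRange_one _ _).filter _
  have hres1 : (hits.foldl
        (fun (st : List String × Int) i =>
          if st.2 ≤ i then
            (st.1 ++ [pvContext cs i ((klw.length : Nat) : Int)], i + ((klw.length : Nat) : Int))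
          else st) ([], 0)).1
      = (pvSel ((klw.length : Nat) : Int) hits 0).map
          (fun i => pvContext cs i ((klw.length : Nat) : Int)) := by
    have := pvFoldl_sel (fun i => pvContext cs i ((klw.length : Nat) : Int))
      ((klw.length : Nat) : Int) hits [] 0
    simpa using this
  have hmapeq : (fun pos => pvContext cs pos (kw.toList.length : Int))
      = (fun i => pvContext cs i ((klw.length : Nat) : Int)) := by
    rw [hkwlen]
  rw [hposeq, hres1, hmapeq]
  by_cases hsel : pvSel ((klw.length : Nat) : Int) hits 0 = []
  · simp [hsel]
  · have hmne : (pvSel ((klw.length : Nat) : Int) hits 0).map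
        (fun i => pvContext cs i ((klw.length : Nat) : Int)) ≠ [] := by
      simpa [List.map_eq_nil_iff] using hsel
    rw [if_pos hmne, if_pos hsel]

-- ===== VERDICT (by name: the statement is the Claim_ definition above) =====
theorem find_keyword_matches_py_spec : Claim_equal_find_keyword_matches_py := by
  intro content keywords hdom hpre
  unfold Spec_find_keyword_matches_py find_keyword_matches_py find_keyword_matches_py_alt
  dsimp only
  congr 1
  apply PySem.List.foldl_congr_mem
  intro acc kw hkw
  have hkne : kw ≠ "" := by
    intro h
    exact hpre (h ▸ hkw)
  exact pvStep_eq content.toList kw hkne acc
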